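-- pv_equiv track=rewrite | github.com/joakimboda/exjobb | exjobb/3DCNN/deep_learning_jyp.py | make_atom_layers
-- ===== SOURCE A (Python) =====
-- def make_atom_layers(structure_data):
--
--     layer1_check = ['CYS:SG','MET:SD','MSE:SE']
--     layer2_check = ['ASN:ND2','GLN:NE2'] #Backbone N
--     layer3_check = ['HIS:ND1','HIS:NE1','TRP:NE1']
--     layer4_check = ['ARG:NE','ARG:NH1','ARG:NH2','ARG:NH3']
--     layer5_check = ['LYS:NZ']
--     layer6_check = ['ASN:OD1','GLN:OE1'] #Backbone O?
--     layer7_check = ['SER:OG','THR:OG1','TYR:OH']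
--     layer8_check = ['ASP:OD1','ASP:OD2','ASP:OD3','GLU:OE1','GLU:OE2','GLU:OE3']
--     layer9_check = ['ARG:CZ','ASN:CG','ASP:CG','GLN:CD','GLU:CD'] #Backbone C?
--     layer10_check = ['HIS:CG','HIS:CD2','HIS:CE1','PHE:CG','PHE:CD1','PHE:CD2','PHE:CD3','PHE:CE1','PHE:CE2','PHE:CE3','PHE:CZ','TRP:CG','TRP:CD1','TRP:CD2','TRP:CD3','TRP:CD3','TRP:CE1','TRP:CE2','TRP:CE3','TRP:CZ1','TRP:CZ2','TRP:CZ3','TRP:CH2','TYR:CG','TYR:CD1','TYR:CD2','TYR:CD3','TYR:CE1','TYR:CE2','TYR:CE3','TYR:CZ']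
--     layer11_check = ['ALA:CB','ARG:CB','ARG:CG','ARG:CD','ASN:CB','ASP:CB','CYS:CB','GLN:CB','GLN:CG','GLU:CB','GLU:CG','HIS:CB','ILE:CB','ILE:CG1','ILE:CG2','ILE:CG3','ILE:CD1','LEU:CB','LEU:CG','LEU:CD1','LEU:CD2','LEU:CD3','LYS:CB','LYS:CG','LYS:CD','LYS:CE','MET:CB','MET:CG','MET:CE','MSE:CB','MSE:CG','MSE:CE','PHE:CB','PRO:CB','PRO:CG','PRO:CD','SER:CB','THR:CB','THR:CG2','TRP:CB','TYR:CB','VAL:CB','VAL:CG1','VAL:CG2','VAL:CG3'] #Backbone CA?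
--
--     layers={}
--
--     for key, atom in structure_data.items():
--         if atom[2] == 'N':
--             layers.setdefault('2', []).append(atom)
--         elif atom[2] == 'O':
--             layers.setdefault('6', []).append(atom)
--         elif atom[2] == 'C':
--             layers.setdefault('9', []).append(atom)
--         elif atom[2] == 'CA':
--             layers.setdefault('11', []).append(atom)
--         elif atom[2] == 'OXT':
--             layers.setdefault('8', []).append(atom)
--         elif atom[2] == 'OCterm': #C-terminal O
--             layers.setdefault('8', []).append(atom)
--         else:
--             atom_type = atom[1] + ':' + atom[2]
--             if atom_type in layer1_check:
--                 layers.setdefault('1', []).append(atom)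
--             elif atom_type in layer2_check:
--                 layers.setdefault('2', []).append(atom)
--             elif atom_type in layer3_check:
--                 layers.setdefault('3', []).append(atom)
--             elif atom_type in layer4_check:
--                 layers.setdefault('4', []).append(atom)
--             elif atom_type in layer5_check:
--                 layers.setdefault('5', []).append(atom)
--             elif atom_type in layer6_check:
--                 layers.setdefault('6', []).append(atom)
--             elif atom_type in layer7_check:
--                 layers.setdefault('7', []).append(atom)
--             elif atom_type in layer8_check:
--                 layers.setdefault('8', []).append(atom)
--             elif atom_type in layer9_check:
--                 layers.setdefault('9', []).append(atom)
--             elif atom_type in layer10_check: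
--                 layers.setdefault('10', []).append(atom)
--             elif atom_type in layer11_check:
--                 layers.setdefault('11', []).append(atom)
--             else:
--                 d=1# print str(key) + str(atom[1:3]) + ' Has not been assigned to any layer' #layers.setdefault('12', []).append(atom)
--
--     #This is to check if anything is not sorted into a layer
--     #for key,atom in layers.items():
--         #if key=='12':
--            # for x in atom:
--              #   print x
--
--     return(layers)
-- ===== SOURCE B (Python) =====
-- _CHECKS = [
--     ('1', ['CYS:SG','MET:SD','MSE:SE']),
--     ('2', ['ASN:ND2','GLN:NE2']),
--     ('3', ['HIS:ND1','HIS:NE1','TRP:NE1']),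
--     ('4', ['ARG:NE','ARG:NH1','ARG:NH2','ARG:NH3']),
--     ('5', ['LYS:NZ']),
--     ('6', ['ASN:OD1','GLN:OE1']),
--     ('7', ['SER:OG','THR:OG1','TYR:OH']),
--     ('8', ['ASP:OD1','ASP:OD2','ASP:OD3','GLU:OE1','GLU:OE2','GLU:OE3']),
--     ('9', ['ARG:CZ','ASN:CG','ASP:CG','GLN:CD','GLU:CD']),
--     ('10', ['HIS:CG','HIS:CD2','HIS:CE1','PHE:CG','PHE:CD1','PHE:CD2','PHE:CD3','PHE:CE1','PHE:CE2','PHE:CE3','PHE:CZ','TRP:CG','TRP:CD1','TRP:CD2','TRP:CD3','TRP:CD3','TRP:CE1','TRP:CE2','TRP:CE3','TRP:CZ1','TRP:CZ2','TRP:CZ3','TRP:CH2','TYR:CG','TYR:CD1','TYR:CD2','TYR:CD3','TYR:CE1','TYR:CE2','TYR:CE3','TYR:CZ']),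
--     ('11', ['ALA:CB','ARG:CB','ARG:CG','ARG:CD','ASN:CB','ASP:CB','CYS:CB','GLN:CB','GLN:CG','GLU:CB','GLU:CG','HIS:CB','ILE:CB','ILE:CG1','ILE:CG2','ILE:CG3','ILE:CD1','LEU:CB','LEU:CG','LEU:CD1','LEU:CD2','LEU:CD3','LYS:CB','LYS:CG','LYS:CD','LYS:CE','MET:CB','MET:CG','MET:CE','MSE:CB','MSE:CG','MSE:CE','PHE:CB','PRO:CB','PRO:CG','PRO:CD','SER:CB','THR:CB','THR:CG2','TRP:CB','TYR:CB','VAL:CB','VAL:CG1','VAL:CG2','VAL:CG3']),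
-- ]
--
-- # Flat RES:ATOM -> layer table, built once; earlier check-lists win on collisions.
-- _ATOM_LAYER = {}
-- for _layer, _names in _CHECKS:
--     for _name in _names:
--         _ATOM_LAYER.setdefault(_name, _layer)
--
-- # Backbone atom names, decided by atom[2] alone, before the RES:ATOM table.
-- _BACKBONE = {'N': '2', 'O': '6', 'C': '9', 'CA': '11', 'OXT': '8', 'OCterm': '8'}
--
--
-- def _classify(atom):
--     layer = _BACKBONE.get(atom[2])
--     if layer is not None:
--         return layer
--     return _ATOM_LAYER.get(atom[1] + ':' + atom[2])
--
--
-- def make_atom_layers(structure_data):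
--     # Staged: (1) label every atom with its layer (or None); (2) compute the
--     # layer order as the order of first appearance; (3) one grouping pass per layer.
--     labeled = [(_classify(atom), atom) for atom in structure_data.values()]
--     order = dict.fromkeys(lab for lab, _ in labeled if lab is not None)
--     return {lab: [atom for l, atom in labeled if l == lab] for lab in order}
-- ===== Notes on version B (the rewrite author's own statement) =====
-- stated objective: faster
-- what changed: A's single pass that classifies each atom through a 6-branch backbone cascade plus an 11-way elif chain of list-membership scans while appending into the layers dict is replaced by a staged pipeline: one labelling pass tagging every atom with its layer via tables built once, dict.fromkeys to fix the layer order by first appearance, then one grouping comprehension per layer.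
import Mathlib
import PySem

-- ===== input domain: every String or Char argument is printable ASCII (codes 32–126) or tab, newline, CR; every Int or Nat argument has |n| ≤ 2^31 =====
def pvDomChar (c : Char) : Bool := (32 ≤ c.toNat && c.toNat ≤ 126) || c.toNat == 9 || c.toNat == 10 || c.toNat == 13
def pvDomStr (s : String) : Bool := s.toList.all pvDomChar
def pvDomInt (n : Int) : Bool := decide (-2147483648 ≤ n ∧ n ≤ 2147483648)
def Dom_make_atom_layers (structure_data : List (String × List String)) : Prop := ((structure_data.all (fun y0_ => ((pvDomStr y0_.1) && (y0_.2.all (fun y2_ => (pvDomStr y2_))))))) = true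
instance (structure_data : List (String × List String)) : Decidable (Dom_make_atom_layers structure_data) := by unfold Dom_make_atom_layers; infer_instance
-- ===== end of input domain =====

-- B replaces A's single-pass dict-accumulation (6-branch backbone cascade + 11-way elif
-- chain run while appending into layers) by a staged pipeline: label every atom once with
-- its layer via tables built once, take the layer order as order of first appearance, then
-- build each layer's list by its own grouping pass (alternative decomposition).

-- ===== PORT A =====
-- atom[i] for i = 1, 2; Pre_ guarantees the index is in range, so getD "" is never used
def pyS (atom : List String) (i : Int) : String := (PySem.List.pyGet? atom i).getD ""

-- layers.setdefault(k, []).append(atom)  ==  layers[k] = layers.get(k, []) + [atom]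
def sdApp (d : PySem.Dict String (List (List String))) (k : String) (atom : List String) :
    PySem.Dict String (List (List String)) :=
  d.modify k [] (· ++ [atom])

def layer1_check : List String := ["CYS:SG","MET:SD","MSE:SE"]
def layer2_check : List String := ["ASN:ND2","GLN:NE2"]
def layer3_check : List String := ["HIS:ND1","HIS:NE1","TRP:NE1"]
def layer4_check : List String := ["ARG:NE","ARG:NH1","ARG:NH2","ARG:NH3"]
def layer5_check : List String := ["LYS:NZ"]
def layer6_check : List String := ["ASN:OD1","GLN:OE1"]
def layer7_check : List String := ["SER:OG","THR:OG1","TYR:OH"]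
def layer8_check : List String := ["ASP:OD1","ASP:OD2","ASP:OD3","GLU:OE1","GLU:OE2","GLU:OE3"]
def layer9_check : List String := ["ARG:CZ","ASN:CG","ASP:CG","GLN:CD","GLU:CD"]
def layer10_check : List String := ["HIS:CG","HIS:CD2","HIS:CE1","PHE:CG","PHE:CD1","PHE:CD2","PHE:CD3","PHE:CE1","PHE:CE2","PHE:CE3","PHE:CZ","TRP:CG","TRP:CD1","TRP:CD2","TRP:CD3","TRP:CD3","TRP:CE1","TRP:CE2","TRP:CE3","TRP:CZ1","TRP:CZ2","TRP:CZ3","TRP:CH2","TYR:CG","TYR:CD1","TYR:CD2","TYR:CD3","TYR:CE1","TYR:CE2","TYR:CE3","TYR:CZ"]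
def layer11_check : List String := ["ALA:CB","ARG:CB","ARG:CG","ARG:CD","ASN:CB","ASP:CB","CYS:CB","GLN:CB","GLN:CG","GLU:CB","GLU:CG","HIS:CB","ILE:CB","ILE:CG1","ILE:CG2","ILE:CG3","ILE:CD1","LEU:CB","LEU:CG","LEU:CD1","LEU:CD2","LEU:CD3","LYS:CB","LYS:CG","LYS:CD","LYS:CE","MET:CB","MET:CG","MET:CE","MSE:CB","MSE:CG","MSE:CE","PHE:CB","PRO:CB","PRO:CG","PRO:CD","SER:CB","THR:CB","THR:CG2","TRP:CB","TYR:CB","VAL:CB","VAL:CG1","VAL:CG2","VAL:CG3"]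

-- the body of A's loop (kv = (key, atom))
def aStep (layers : PySem.Dict String (List (List String))) (kv : String × List String) :
    PySem.Dict String (List (List String)) :=
  let atom := kv.2
  if pyS atom 2 == "N" then sdApp layers "2" atom
  else if pyS atom 2 == "O" then sdApp layers "6" atom
  else if pyS atom 2 == "C" then sdApp layers "9" atom
  else if pyS atom 2 == "CA" then sdApp layers "11" atom
  else if pyS atom 2 == "OXT" then sdApp layers "8" atom
  else if pyS atom 2 == "OCterm" then sdApp layers "8" atom
  else
    let atom_type := pyS atom 1 ++ ":" ++ pyS atom 2
    if layer1_check.contains atom_type then sdApp layers "1" atom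
    else if layer2_check.contains atom_type then sdApp layers "2" atom
    else if layer3_check.contains atom_type then sdApp layers "3" atom
    else if layer4_check.contains atom_type then sdApp layers "4" atom
    else if layer5_check.contains atom_type then sdApp layers "5" atom
    else if layer6_check.contains atom_type then sdApp layers "6" atom
    else if layer7_check.contains atom_type then sdApp layers "7" atom
    else if layer8_check.contains atom_type then sdApp layers "8" atom
    else if layer9_check.contains atom_type then sdApp layers "9" atom
    else if layer10_check.contains atom_type then sdApp layers "10" atom
    else if layer11_check.contains atom_type then sdApp layers "11" atom
    else layers

def make_atom_layers (structure_data : List (String × List String)) :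
    List (String × List (List String)) :=
  (structure_data.foldl aStep PySem.Dict.empty).items

-- ===== PORT B =====
def pvChecks : List (String × List String) :=
  [("1", layer1_check), ("2", layer2_check), ("3", layer3_check), ("4", layer4_check),
   ("5", layer5_check), ("6", layer6_check), ("7", layer7_check), ("8", layer8_check),
   ("9", layer9_check), ("10", layer10_check), ("11", layer11_check)]

-- _ATOM_LAYER built once with setdefault (first insertion wins)
def pvAtomLayer : PySem.Dict String String :=
  pvChecks.foldl (fun d p => p.2.foldl (fun d n => d.setdefault n p.1) d) PySem.Dict.empty

def pvBackbone : PySem.Dict String String :=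
  PySem.Dict.ofList [("N","2"),("O","6"),("C","9"),("CA","11"),("OXT","8"),("OCterm","8")]

-- _classify: backbone name first, else the RES:ATOM table
def pvClassify (atom : List String) : Option String :=
  match pvBackbone.get? (pyS atom 2) with
  | some l => some l
  | none => pvAtomLayer.get? (pyS atom 1 ++ ":" ++ pyS atom 2)

def make_atom_layers_alt (structure_data : List (String × List String)) :
    List (String × List (List String)) :=
  let labeled := (structure_data.map (·.2)).map (fun atom => (pvClassify atom, atom))
  let order := PySem.List.dedup (labeled.filterMap (·.1))
  order.map (fun lab => (lab, (labeled.filter (fun p => p.1 == some lab)).map (·.2)))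

-- ===== PRECONDITION & SPEC =====
-- Pre_ excludes atoms with fewer than 3 fields, on which A raises IndexError at atom[2],
-- and duplicate keys, which a Python dict argument cannot represent.
def Pre_make_atom_layers (structure_data : List (String × List String)) : Prop :=
  (structure_data.map (·.1)).Nodup ∧ ∀ p ∈ structure_data, 3 ≤ p.2.length
instance (structure_data : List (String × List String)) : Decidable (Pre_make_atom_layers structure_data) := by unfold Pre_make_atom_layers; infer_instance

def pvWitness_make_atom_layers : (List (String × List String)) :=
  [("a1", ["1", "ALA", "CA", "x"]), ("a2", ["2", "CYS", "SG", "y"])]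

def Spec_make_atom_layers (structure_data : List (String × List String)) (out : List (String × List (List String))) : Prop := out = make_atom_layers_alt structure_data
instance (structure_data : List (String × List String)) (out : List (String × List (List String))) : Decidable (Spec_make_atom_layers structure_data out) := by unfold Spec_make_atom_layers; infer_instance

-- ===== CLAIM (what is proved, stated in full; the proofs are below) =====
def Claim_equal_make_atom_layers : Prop := ∀ (structure_data : List (String × List String)), Dom_make_atom_layers structure_data → Pre_make_atom_layers structure_data → Spec_make_atom_layers structure_data (make_atom_layers structure_data)

-- ===== LEMMAS AND PROOFS =====

-- first-some on options (Python's 'l if l is not None else …')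
def oE (a b : Option String) : Option String :=
  match a with | some x => some x | none => b

-- A's elif chain, abstracted over a list of (layer, names) pairs
def cascadeOf : List (String × List String) → String → Option String
  | [], _ => none
  | (l, ns) :: rest, s => if ns.contains s then some l else cascadeOf rest s

theorem oE_assoc (a b c : Option String) : oE (oE a b) c = oE a (oE b c) := by
  cases a <;> simp [oE]

theorem setdefault_get? (d : PySem.Dict String String) (k v s : String) :
    (d.setdefault k v).get? s = oE (d.get? s) (if s == k then some v else none) := by
  by_cases hk : d.contains k = true
  · rw [PySem.Dict.setdefault_of_contains d v hk]
    by_cases hs : s = k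
    · subst hs
      have h2 : (d.get? s).isSome = true := by
        rw [← PySem.Dict.contains_eq_isSome_get?]; exact hk
      obtain ⟨x, hx⟩ := Option.isSome_iff_exists.mp h2
      simp [oE, hx]
    · cases h : d.get? s <;> simp [oE, hs]
  · rw [PySem.Dict.setdefault_of_not_contains d v (by simpa using hk)]
    by_cases hs : s = k
    · subst hs
      have hn : d.get? s = none := (PySem.Dict.get?_eq_none_iff_contains d s).mpr (by simpa using hk)
      rw [PySem.Dict.get?_insert_self, hn]
      simp [oE]
    · rw [PySem.Dict.get?_insert_of_ne d v hs]
      cases h : d.get? s <;> simp [oE, hs]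

theorem inner_fold_get? (ns : List String) (l : String)
    (d : PySem.Dict String String) (s : String) :
    ((ns.foldl (fun d n => d.setdefault n l) d).get? s)
      = oE (d.get? s) (if ns.contains s then some l else none) := by
  induction ns generalizing d with
  | nil => cases h : d.get? s <;> simp [oE, h]
  | cons n ns ih =>
    rw [List.foldl_cons, ih, setdefault_get?, oE_assoc]
    congr 1
    by_cases h : s = n
    · subst h; simp [oE]
    · simp [oE, h]

theorem outer_fold_get? (cs : List (String × List String))
    (d : PySem.Dict String String) (s : String) :
    ((cs.foldl (fun d p => p.2.foldl (fun d n => d.setdefault n p.1) d) d).get? s)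
      = oE (d.get? s) (cascadeOf cs s) := by
  induction cs generalizing d with
  | nil => cases h : d.get? s <;> simp [oE, h, cascadeOf]
  | cons c cs ih =>
    rw [List.foldl_cons, ih, inner_fold_get?, oE_assoc]
    rcases c with ⟨l, ns⟩
    congr 1
    by_cases h : s ∈ ns <;> simp [cascadeOf, h, oE]

theorem pvAtomLayer_get? (s : String) : pvAtomLayer.get? s = cascadeOf pvChecks s := by
  have h := outer_fold_get? pvChecks PySem.Dict.empty s
  simpa [pvAtomLayer, PySem.Dict.get?_empty, oE] using h

theorem cascade_eq (s : String) : cascadeOf pvChecks s =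
  (if layer1_check.contains s then some "1"
   else if layer2_check.contains s then some "2"
   else if layer3_check.contains s then some "3"
   else if layer4_check.contains s then some "4"
   else if layer5_check.contains s then some "5"
   else if layer6_check.contains s then some "6"
   else if layer7_check.contains s then some "7"
   else if layer8_check.contains s then some "8"
   else if layer9_check.contains s then some "9"
   else if layer10_check.contains s then some "10"
   else if layer11_check.contains s then some "11"
   else none) := rfl

-- a chain of guarded appends / its option of the first fired guard
def chainOpt : List (Bool × String) → Option String
  | [] => none
  | (c, l) :: r => if c then some l else chainOpt r
def chainIf (d : PySem.Dict String (List (List String))) (a : List String) :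
    List (Bool × String) → PySem.Dict String (List (List String))
  | [] => d
  | (c, l) :: r => if c then sdApp d l a else chainIf d a r
def appOpt (d : PySem.Dict String (List (List String))) (a : List String) :
    Option String → PySem.Dict String (List (List String))
  | some l => sdApp d l a
  | none => d

theorem chain_eq (d : PySem.Dict String (List (List String))) (a : List String)
    (ps : List (Bool × String)) : chainIf d a ps = appOpt d a (chainOpt ps) := by
  induction ps with
  | nil => rfl
  | cons p r ih => rcases p with ⟨c, l⟩; cases c <;> simp [chainIf, chainOpt, ih, appOpt]

theorem chainOpt_append (xs ys : List (Bool × String)) :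
    chainOpt (xs ++ ys) = oE (chainOpt xs) (chainOpt ys) := by
  induction xs with
  | nil => rfl
  | cons p r ih => rcases p with ⟨c, l⟩; cases c <;> simp [chainOpt, ih, oE]

theorem pvClassify_eq_oE (atom : List String) :
    pvClassify atom = oE (pvBackbone.get? (pyS atom 2))
      (pvAtomLayer.get? (pyS atom 1 ++ ":" ++ pyS atom 2)) := rfl

-- A's loop body appends the atom at the layer pvClassify computes (or leaves layers alone)
theorem step_eq (layers : PySem.Dict String (List (List String)))
    (kv : String × List String) : aStep layers kv = appOpt layers kv.2 (pvClassify kv.2) := by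
  rcases kv with ⟨k, atom⟩
  simp only [aStep]
  rw [pvClassify_eq_oE, pvAtomLayer_get?, cascade_eq]
  have hB : pvBackbone = PySem.Dict.mk
      [("N","2"),("O","6"),("C","9"),("CA","11"),("OXT","8"),("OCterm","8")] := by decide
  rw [hB]
  simp only [PySem.Dict.get?_mk_cons]
  have comm : ∀ a b : String, (a == b) = (b == a) := fun a b => by
    by_cases h : a = b
    · subst h; rfl
    · simp [h, Ne.symm h]
  rw [comm "N", comm "O", comm "C", comm "CA", comm "OXT", comm "OCterm"]
  show chainIf layers atom
      ([(pyS atom 2 == "N", "2"), (pyS atom 2 == "O", "6"), (pyS atom 2 == "C", "9"),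
        (pyS atom 2 == "CA", "11"), (pyS atom 2 == "OXT", "8"), (pyS atom 2 == "OCterm", "8")] ++
       [(layer1_check.contains (pyS atom 1 ++ ":" ++ pyS atom 2), "1"),
        (layer2_check.contains (pyS atom 1 ++ ":" ++ pyS atom 2), "2"),
        (layer3_check.contains (pyS atom 1 ++ ":" ++ pyS atom 2), "3"),
        (layer4_check.contains (pyS atom 1 ++ ":" ++ pyS atom 2), "4"),
        (layer5_check.contains (pyS atom 1 ++ ":" ++ pyS atom 2), "5"),
        (layer6_check.contains (pyS atom 1 ++ ":" ++ pyS atom 2), "6"),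
        (layer7_check.contains (pyS atom 1 ++ ":" ++ pyS atom 2), "7"),
        (layer8_check.contains (pyS atom 1 ++ ":" ++ pyS atom 2), "8"),
        (layer9_check.contains (pyS atom 1 ++ ":" ++ pyS atom 2), "9"),
        (layer10_check.contains (pyS atom 1 ++ ":" ++ pyS atom 2), "10"),
        (layer11_check.contains (pyS atom 1 ++ ":" ++ pyS atom 2), "11")]) =
    appOpt layers atom (oE
      (chainOpt [(pyS atom 2 == "N", "2"), (pyS atom 2 == "O", "6"), (pyS atom 2 == "C", "9"),
        (pyS atom 2 == "CA", "11"), (pyS atom 2 == "OXT", "8"), (pyS atom 2 == "OCterm", "8")])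
      (chainOpt
       [(layer1_check.contains (pyS atom 1 ++ ":" ++ pyS atom 2), "1"),
        (layer2_check.contains (pyS atom 1 ++ ":" ++ pyS atom 2), "2"),
        (layer3_check.contains (pyS atom 1 ++ ":" ++ pyS atom 2), "3"),
        (layer4_check.contains (pyS atom 1 ++ ":" ++ pyS atom 2), "4"),
        (layer5_check.contains (pyS atom 1 ++ ":" ++ pyS atom 2), "5"),
        (layer6_check.contains (pyS atom 1 ++ ":" ++ pyS atom 2), "6"),
        (layer7_check.contains (pyS atom 1 ++ ":" ++ pyS atom 2), "7"),
        (layer8_check.contains (pyS atom 1 ++ ":" ++ pyS atom 2), "8"),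
        (layer9_check.contains (pyS atom 1 ++ ":" ++ pyS atom 2), "9"),
        (layer10_check.contains (pyS atom 1 ++ ":" ++ pyS atom 2), "10"),
        (layer11_check.contains (pyS atom 1 ++ ":" ++ pyS atom 2), "11")]))
  rw [← chainOpt_append, chain_eq]

-- the classified (layer, atom) pairs that actually get appended, in input order
def pairsOf (sd : List (String × List String)) : List (String × List String) :=
  sd.filterMap (fun kv => (pvClassify kv.2).map (fun l => (l, kv.2)))

theorem foldA_eq (sd : List (String × List String))
    (d : PySem.Dict String (List (List String))) :
    sd.foldl aStep d = (pairsOf sd).foldl (fun d p => sdApp d p.1 p.2) d := by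
  induction sd generalizing d with
  | nil => rfl
  | cons kv sd ih =>
    rw [List.foldl_cons, step_eq]
    cases h : pvClassify kv.2 with
    | none => simp [pairsOf, h, appOpt, ih]
    | some l => simp [pairsOf, h, appOpt, ih]

-- B's labelled list
def labeledOf (sd : List (String × List String)) : List (Option String × List String) :=
  (sd.map (·.2)).map (fun atom => (pvClassify atom, atom))

theorem map_fst_pairs (sd : List (String × List String)) :
    (pairsOf sd).map (·.1) = (labeledOf sd).filterMap (·.1) := by
  induction sd with
  | nil => rfl
  | cons kv sd ih =>
    simp only [pairsOf, labeledOf, List.map_cons, List.filterMap_cons] at ih ⊢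
    cases h : pvClassify kv.2 <;> simp [ih]

theorem filter_pairs (sd : List (String × List String)) (k : String) :
    ((pairsOf sd).filter (fun p => p.1 == k)).map (·.2)
      = ((labeledOf sd).filter (fun p => p.1 == some k)).map (·.2) := by
  induction sd with
  | nil => rfl
  | cons kv sd ih =>
    simp only [pairsOf, labeledOf, List.map_cons, List.filterMap_cons] at ih ⊢
    cases h : pvClassify kv.2 with
    | none => simp [ih]
    | some l => by_cases hl : l = k <;> simp [ih, hl]

theorem a_as_grouping (sd : List (String × List String)) :
    make_atom_layers sd
      = (PySem.Set.ofList ((pairsOf sd).map (·.1))).map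
          (fun k => (k, ((pairsOf sd).filter (fun p => p.1 == k)).map (·.2))) := by
  unfold make_atom_layers
  rw [foldA_eq]
  simp only [sdApp]
  have hnd : (((pairsOf sd).foldl
      (fun d p => d.modify p.1 [] (· ++ [p.2])) PySem.Dict.empty)).keys.Nodup := by
    exact PySem.Dict.nodup_keys_foldl_modify_key (pairsOf sd) (·.1) []
      (fun _ p v => v ++ [p.2]) PySem.Dict.empty (by simp [PySem.Dict.keys_empty])
  rw [PySem.Dict.items_eq_map_keys _ hnd []]
  rw [PySem.Dict.keys_foldl_modify_key (pairsOf sd) (·.1) [] (fun _ p v => v ++ [p.2])]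
  rw [PySem.Dict.keys_empty, PySem.Set.update_nil_left]
  apply List.map_congr_left
  intro k _
  rw [PySem.Dict.getD_foldl_modify_append (pairsOf sd) PySem.Dict.empty k]
  simp [PySem.Dict.getD_empty]

theorem dedup_eq_ofList (xs : List String) :
    PySem.List.dedup xs = PySem.Set.ofList xs := rfl

-- ===== VERDICT (by name: the statement is the Claim_ definition above) =====
theorem make_atom_layers_spec : Claim_equal_make_atom_layers := by
  intro sd _ _
  show make_atom_layers sd = make_atom_layers_alt sd
  rw [a_as_grouping]
  show _ = (PySem.List.dedup ((labeledOf sd).filterMap (·.1))).map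
      (fun lab => (lab, ((labeledOf sd).filter (fun p => p.1 == some lab)).map (·.2)))
  rw [dedup_eq_ofList, ← map_fst_pairs]
  apply List.map_congr_left
  intro k _
  rw [filter_pairs]
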